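-- pv_equiv track=rewrite | github.com/SyeonPark24/Coding-Test-Study | 프로그래머스/2/42586. 기능개발/기능개발.py | solution
-- ===== SOURCE A (Python) =====
-- import math
--
-- def solution(progresses, speeds):
--     answer = []
--     temp = 0  # 현재 배포 그룹의 기준일
--     for i in range(len(progresses)):
--         # 해당 기능이 완료되는 날짜 계산 (올림)
--         days_needed = math.ceil((100 - progresses[i]) / speeds[i])
--
--         # 현재 배포 그룹보다 오래 걸리면 → 새 그룹 시작
--         if days_needed > temp:
--             temp = days_needed
--             answer.append(1)  # 새로운 그룹에 첫 기능 추가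
--         else:
--             answer[-1] += 1  # 현재 그룹에 기능 추가
--
--     return answer
-- ===== SOURCE B (Python) =====
-- from collections import deque
--
-- def solution(progresses, speeds):
--     # completion day of each feature: ceil((100-p)/s), computed with integer ceiling division
--     days = deque(-((p - 100) // s) for p, s in zip(progresses, speeds))
--     answer = []
--     while days:
--         front = days.popleft()      # leader of a new deployment group
--         count = 1
--         while days and days[0] <= front:
--             days.popleft()          # follower deploys with the leader
--             count += 1
--         answer.append(count)
--     return answer
-- ===== Notes on version B (the rewrite author's own statement) =====
-- stated objective: alternative
-- what changed: Replaces A's single flat pass with a running-max register and float math.ceil by a queue of integer ceiling-division completion days consumed by a nested leader-then-followers loop that emits one group count per outer iteration.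
-- crash fix: A raises IndexError when speeds is shorter than progresses, or on answer[-1] when the first completion day is not positive (progresses[0] >= 100 or a negative first speed); B returns the grouping of the zipped prefix there, e.g. [1] for ([100],[1]). — e.g. on solution([100], [1]): A raises IndexError, B returns [1]
import Mathlib
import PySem

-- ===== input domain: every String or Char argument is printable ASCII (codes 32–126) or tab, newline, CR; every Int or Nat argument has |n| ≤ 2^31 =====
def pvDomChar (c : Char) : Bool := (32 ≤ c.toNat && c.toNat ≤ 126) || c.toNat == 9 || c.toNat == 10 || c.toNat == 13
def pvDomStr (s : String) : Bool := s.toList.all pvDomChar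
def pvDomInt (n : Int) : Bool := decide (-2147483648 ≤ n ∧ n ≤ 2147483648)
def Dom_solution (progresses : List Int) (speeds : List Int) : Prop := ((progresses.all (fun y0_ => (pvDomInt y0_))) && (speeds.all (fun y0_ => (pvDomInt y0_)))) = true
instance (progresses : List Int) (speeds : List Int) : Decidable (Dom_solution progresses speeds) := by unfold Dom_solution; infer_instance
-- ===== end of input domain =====

-- B replaces A's flat pass with a running-max register (and float ceil) by a queue of integer
-- ceiling-division completion days consumed by a nested leader-then-followers loop (alternative decomposition).


-- ===== PORT A =====
-- answer[-1] += 1 : last element incremented (Python raises on empty; excluded by Pre_, default keeps the port total)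
def pvIncLast (xs : List Int) : List Int := xs.dropLast ++ [xs.getLastD 0 + 1]

-- math.ceil((100-p)/s) ported as the exact ceiling division -((-(100-p)) // s), exact on Dom
-- (|ints| ≤ 2^31 keeps the correctly-rounded float division's ceil equal to the exact ceil); s = 0 is excluded by Pre_
def solution (progresses : List Int) (speeds : List Int) : List Int :=
  ((PySem.List.pyRange 0 progresses.length 1).foldl
    (fun (st : List Int × Int) i =>
      let p := PySem.List.pyGetD progresses i 0
      let s := PySem.List.pyGetD speeds i 0
      let daysNeeded := -(PySem.Int.floordiv (-(100 - p)) s)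
      if st.2 < daysNeeded then (st.1 ++ [1], daysNeeded)
      else (pvIncLast st.1, st.2))
    ([], 0)).1

-- ===== PORT B =====
-- inner while: pop followers with day ≤ front, returning (1 + their number, remaining queue)
def pvTakeGroup (front : Int) : List Int → Int × List Int
  | [] => (1, [])
  | d :: rest =>
    if d ≤ front then
      let r := pvTakeGroup front rest
      (r.1 + 1, r.2)
    else (1, d :: rest)

-- outer while over the queue of completion days; fuel = initial queue length is only a totality guard
def pvGroupsAux : Nat → List Int → List Int
  | 0, _ => []
  | _, [] => []
  | fuel + 1, d :: rest =>
    let g := pvTakeGroup d rest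
    g.1 :: pvGroupsAux fuel g.2

def pvGroups (xs : List Int) : List Int := pvGroupsAux xs.length xs

def solution_alt (progresses : List Int) (speeds : List Int) : List Int :=
  pvGroups ((progresses.zip speeds).map (fun ps => -(PySem.Int.floordiv (ps.1 - 100) ps.2)))

-- ===== PRECONDITION & SPEC =====
-- Pre_ excludes exactly the inputs where the Python A raises: speeds shorter than progresses or a
-- used zero speed (IndexError / ZeroDivisionError), and a first completion day ≤ 0 (IndexError on answer[-1]).
def Pre_solution (progresses : List Int) (speeds : List Int) : Prop :=
  progresses.length ≤ speeds.length ∧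
  (∀ s ∈ speeds.take progresses.length, s ≠ 0) ∧
  (progresses ≠ [] → 0 < -(PySem.Int.floordiv (progresses.headI - 100) speeds.headI))
instance (progresses : List Int) (speeds : List Int) : Decidable (Pre_solution progresses speeds) := by
  unfold Pre_solution; infer_instance

def pvWitness_solution : List Int × List Int := ([93, 30, 55], [1, 30, 5])

-- Where A raises but B returns: all zipped speeds nonzero, and either speeds is shorter than progresses
-- (A IndexError on speeds[i], B groups the zipped prefix) or the first completion day is not positive
-- (A IndexError on answer[-1], B returns the normal grouping).
def Raises_solution (progresses : List Int) (speeds : List Int) : Prop :=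
  (∀ s ∈ speeds.take progresses.length, s ≠ 0) ∧
  (speeds.length < progresses.length ∨
    (progresses ≠ [] ∧ speeds ≠ [] ∧
      -(PySem.Int.floordiv (progresses.headI - 100) speeds.headI) ≤ 0))
instance (progresses : List Int) (speeds : List Int) : Decidable (Raises_solution progresses speeds) := by
  unfold Raises_solution; infer_instance

def pvRaiseWitness_solution : List Int × List Int := ([100], [1])
def pvRaiseWitnessOut_solution : List Int := [1]

def Spec_solution (progresses : List Int) (speeds : List Int) (out : List Int) : Prop := out = solution_alt progresses speeds
instance (progresses : List Int) (speeds : List Int) (out : List Int) : Decidable (Spec_solution progresses speeds out) := by unfold Spec_solution; infer_instance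

-- ===== CLAIM (what is proved, stated in full; the proofs are below) =====
def Claim_equal_solution : Prop := ∀ (progresses : List Int) (speeds : List Int), Dom_solution progresses speeds → Pre_solution progresses speeds → Spec_solution progresses speeds (solution progresses speeds)
def Claim_raises_solution : Prop := (∀ (progresses : List Int) (speeds : List Int), Dom_solution progresses speeds → Raises_solution progresses speeds → ¬ Pre_solution progresses speeds) ∧ (Dom_solution (pvRaiseWitness_solution.1) (pvRaiseWitness_solution.2) ∧ Raises_solution (pvRaiseWitness_solution.1) (pvRaiseWitness_solution.2) ∧ solution_alt (pvRaiseWitness_solution.1) (pvRaiseWitness_solution.2) = pvRaiseWitnessOut_solution)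

-- ===== LEMMAS AND PROOFS =====

theorem pvTakeGroup_length (front : Int) (xs : List Int) :
    (pvTakeGroup front xs).2.length ≤ xs.length := by
  induction xs with
  | nil => simp [pvTakeGroup]
  | cons d rest ih =>
    simp only [pvTakeGroup]
    split
    · simpa using Nat.le_succ_of_le ih
    · simp

theorem pvGroupsAux_congr (fuel₁ : Nat) : ∀ (fuel₂ : Nat) (xs : List Int),
    xs.length ≤ fuel₁ → xs.length ≤ fuel₂ → pvGroupsAux fuel₁ xs = pvGroupsAux fuel₂ xs := by
  induction fuel₁ with
  | zero =>
    intro fuel₂ xs h₁ _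
    have : xs = [] := List.eq_nil_of_length_eq_zero (Nat.le_zero.mp h₁)
    subst this
    cases fuel₂ <;> rfl
  | succ f ih =>
    intro fuel₂ xs h₁ h₂
    cases xs with
    | nil => cases fuel₂ <;> rfl
    | cons d rest =>
      cases fuel₂ with
      | zero => simp at h₂
      | succ f₂ =>
        simp only [pvGroupsAux]
        have hlen := pvTakeGroup_length d rest
        simp only [List.length_cons] at h₁ h₂
        rw [ih f₂ (pvTakeGroup d rest).2 (by omega) (by omega)]

theorem pvGroups_cons (d : Int) (rest : List Int) :
    pvGroups (d :: rest) = (pvTakeGroup d rest).1 :: pvGroups (pvTakeGroup d rest).2 := by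
  have hlen := pvTakeGroup_length d rest
  simp only [pvGroups, List.length_cons, pvGroupsAux]
  rw [pvGroupsAux_congr rest.length (pvTakeGroup d rest).2.length (pvTakeGroup d rest).2 hlen (le_refl _)]

-- A's loop body as a function of the completion day
def pvStep (st : List Int × Int) (d : Int) : List Int × Int :=
  if st.2 < d then (st.1 ++ [1], d) else (pvIncLast st.1, st.2)

def pvDay (ps : Int × Int) : Int := -(PySem.Int.floordiv (ps.1 - 100) ps.2)

theorem pvIncLast_append (ans : List Int) (c : Int) :
    pvIncLast (ans ++ [c]) = ans ++ [c + 1] := by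
  simp [pvIncLast]

-- the index-driven fold of port A equals the fold of pvStep over the day list
theorem pvFold_index (P S : List Int) (hL : P.length ≤ S.length) (n : Nat) (hn : n ≤ P.length)
    (init : List Int × Int) :
    (PySem.List.pyRange 0 (n : Int) 1).foldl
      (fun (st : List Int × Int) i =>
        let p := PySem.List.pyGetD P i 0
        let s := PySem.List.pyGetD S i 0
        let daysNeeded := -(PySem.Int.floordiv (-(100 - p)) s)
        if st.2 < daysNeeded then (st.1 ++ [1], daysNeeded)
        else (pvIncLast st.1, st.2)) init
    = (((P.zip S).take n).map pvDay).foldl pvStep init := by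
  induction n with
  | zero => simp
  | succ m ih =>
    have hm : m ≤ P.length := Nat.le_of_succ_le hn
    have hmP : m < P.length := hn
    have hmS : m < S.length := lt_of_lt_of_le hmP hL
    have hz : m < (P.zip S).length := by simp [List.length_zip]; omega
    have hsplit : PySem.List.pyRange 0 ((m + 1 : Nat) : Int) 1
        = PySem.List.pyRange 0 (m : Int) 1 ++ [(m : Int)] := by
      push_cast
      exact PySem.List.pyRange_one_succ_right (by positivity)
    have htake : ((P.zip S).take (m + 1)) = ((P.zip S).take m) ++ [(P.zip S)[m]] := by
      rw [List.take_add_one]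
      simp [List.getElem?_eq_getElem hz]
    rw [hsplit, List.foldl_append, ih hm, htake, List.map_append, List.foldl_append]
    simp only [List.map_cons, List.map_nil, List.foldl_cons, List.foldl_nil]
    have hgP : PySem.List.pyGetD P ((m : Nat) : Int) 0 = P[m] := by
      rw [PySem.List.pyGetD_natCast]; exact List.getD_eq_getElem _ _ hmP
    have hgS : PySem.List.pyGetD S ((m : Nat) : Int) 0 = S[m] := by
      rw [PySem.List.pyGetD_natCast]; exact List.getD_eq_getElem _ _ hmS
    have hEq : -(PySem.Int.floordiv (-(100 - PySem.List.pyGetD P ((m : Nat) : Int) 0))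
        (PySem.List.pyGetD S ((m : Nat) : Int) 0)) = pvDay ((P.zip S)[m]) := by
      rw [hgP, hgS]
      simp only [pvDay, List.getElem_zip]
      congr 2
      ring
    simp only [pvStep, hEq]

-- the fold of A's step over a day list, started inside a group with leader t and count c,
-- produces B's nested grouping
theorem pvFold_groups (xs : List Int) : ∀ (ans : List Int) (c t : Int),
    ((xs.foldl pvStep (ans ++ [c], t)).1)
      = ans ++ ((c - 1 + (pvTakeGroup t xs).1) :: pvGroups (pvTakeGroup t xs).2) := by
  induction xs with
  | nil =>
    intro ans c t
    simp [pvTakeGroup, pvGroups, pvGroupsAux, sub_add_cancel]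
  | cons d rest ih =>
    intro ans c t
    by_cases h : t < d
    · have hne : ¬ d ≤ t := not_le.mpr h
      rw [List.foldl_cons]
      have hstep : pvStep (ans ++ [c], t) d = ((ans ++ [c]) ++ [(1 : Int)], d) := by
        simp [pvStep, h]
      rw [hstep, ih (ans ++ [c]) 1 d]
      simp only [pvTakeGroup, hne, if_false]
      rw [pvGroups_cons]
      have h1 : (1 : Int) - 1 + (pvTakeGroup d rest).1 = (pvTakeGroup d rest).1 := by ring
      have h2 : c - 1 + 1 = c := by ring
      rw [h1, h2, List.append_assoc]
      rfl
    · have hle : d ≤ t := not_lt.mp h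
      rw [List.foldl_cons]
      have hstep : pvStep (ans ++ [c], t) d = (ans ++ [c + 1], t) := by
        simp [pvStep, h, pvIncLast_append]
      rw [hstep, ih ans (c + 1) t]
      simp only [pvTakeGroup, hle, if_true]
      have : c + 1 - 1 + (pvTakeGroup t rest).1 = c - 1 + ((pvTakeGroup t rest).1 + 1) := by ring
      rw [this]

-- ===== VERDICT (by name: the statement is the Claim_ definition above) =====
theorem solution_spec : Claim_equal_solution := by
  intro P S _ hpre
  obtain ⟨hL, _hs, hhead⟩ := hpre
  unfold Spec_solution solution solution_alt
  rw [pvFold_index P S hL P.length (le_refl _)]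
  have htake : (P.zip S).take P.length = P.zip S := by
    apply List.take_of_length_le
    simp [List.length_zip]
  rw [htake]
  cases P with
  | nil => simp [pvGroups, pvGroupsAux]
  | cons p0 P' =>
    cases S with
    | nil => simp at hL
    | cons s0 S' =>
      have hd0 : 0 < pvDay (p0, s0) := by
        simpa [pvDay, List.headI] using hhead (by simp)
      simp only [List.zip_cons_cons, List.map_cons, List.foldl_cons]
      have hstep : pvStep ([], 0) (pvDay (p0, s0)) = (([] : List Int) ++ [(1 : Int)], pvDay (p0, s0)) := by
        simp [pvStep, hd0]
      rw [hstep, pvFold_groups (List.map pvDay (P'.zip S')) [] 1 (pvDay (p0, s0))]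
      rw [pvGroups_cons]
      have h1 : (1 : Int) - 1 + (pvTakeGroup (pvDay (p0, s0)) (List.map pvDay (P'.zip S'))).1
          = (pvTakeGroup (pvDay (p0, s0)) (List.map pvDay (P'.zip S'))).1 := by ring
      rw [h1, List.nil_append]
      rfl

@[simp] theorem solution_raises : Claim_raises_solution := by
  unfold Claim_raises_solution
  constructor
  · rintro P S _ ⟨_, hcase⟩ ⟨hL, _, hpos⟩
    rcases hcase with hlen | ⟨hne, _, hle⟩
    · omega
    · exact absurd (hpos hne) (not_lt.mpr hle)
  · exact ⟨by decide, by decide, by decide⟩
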